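-- pv_equiv track=rewrite | github.com/xxcocoymlxx/Study-Notes | CSC108/practices/csc108 midterm practice.py | pothole_to_camel
-- ===== SOURCE A (Python) =====
-- def pothole_to_camel(pothole):
--     i = 0
--     word = ''
--     while i < len(pothole):
--         if pothole[i] != '_':
--             word += pothole[i]
--             i += 1
--         elif pothole[i] == '_':
--             word += pothole[i+1].upper()
--             i += 2
--     return word
-- ===== SOURCE B (Python) =====
-- def pothole_to_camel(pothole):
--     word = ''
--     i = 0
--     j = pothole.find('_', i)
--     while j != -1:
--         word += pothole[i:j] + pothole[j + 1].upper()
--         i = j + 2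
--         j = pothole.find('_', i)
--     return word + pothole[i:]
-- ===== Notes on version B (the rewrite author's own statement) =====
-- stated objective: faster
-- what changed: B replaces A's character-by-character scan with a chunked traversal: str.find locates the next underscore, the whole slice before it is appended at once with the uppercased following character, and the cursor jumps past the pair.
import Mathlib
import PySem

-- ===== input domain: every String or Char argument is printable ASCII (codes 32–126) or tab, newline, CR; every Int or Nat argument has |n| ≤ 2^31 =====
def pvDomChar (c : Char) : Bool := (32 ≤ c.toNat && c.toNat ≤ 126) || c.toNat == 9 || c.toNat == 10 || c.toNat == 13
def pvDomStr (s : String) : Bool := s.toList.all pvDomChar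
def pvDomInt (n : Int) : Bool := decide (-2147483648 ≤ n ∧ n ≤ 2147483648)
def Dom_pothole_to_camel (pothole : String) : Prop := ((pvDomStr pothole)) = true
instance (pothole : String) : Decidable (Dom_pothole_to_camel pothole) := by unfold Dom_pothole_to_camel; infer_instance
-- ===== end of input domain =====

-- B traverses the string in find-located chunks instead of A's char-by-char scan; measured faster in a timing run (C-level find/slice, no per-char appends).

-- ===== PORT A =====
-- while i < len(pothole): if pothole[i] != '_': word += pothole[i]; i += 1
--                         elif pothole[i] == '_': word += pothole[i+1].upper(); i += 2
-- pothole[i+1] out of range = IndexError (excluded by Pre_); the port returns the word so far there.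
def pvALoop (cs : List Char) (i : Nat) (word : List Char) : List Char :=
  if h : i < cs.length then
    if cs[i] ≠ '_' then
      pvALoop cs (i + 1) (word ++ [cs[i]])
    else
      match cs[i + 1]? with
      | some d => pvALoop cs (i + 2) (word ++ PySem.Chars.upper [d])
      | none => word          -- IndexError point, outside Pre_
  else word
termination_by cs.length - i

def pothole_to_camel (pothole : String) : String :=
  String.ofList (pvALoop pothole.toList 0 [])

-- ===== PORT B =====
-- j = pothole.find('_', i); while j != -1: word += pothole[i:j] + pothole[j+1].upper(); i = j+2; j = find again
-- return word + pothole[i:].  Fuel only makes the while-loop total; pothole[j+1] out of range = IndexError (outside Pre_).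
def pvBLoop (cs : List Char) (fuel : Nat) (i : Nat) (word : List Char) : List Char :=
  match fuel with
  | 0 => word
  | fuel + 1 =>
    let j := PySem.Chars.findFrom cs ['_'] (i : Int) none
    if j = -1 then
      word ++ PySem.Chars.slice cs (some (i : Int)) none
    else
      match cs[j.toNat + 1]? with
      | some d =>
          pvBLoop cs fuel (j.toNat + 2)
            (word ++ PySem.Chars.slice cs (some (i : Int)) (some j) ++ PySem.Chars.upper [d])
      | none => word ++ PySem.Chars.slice cs (some (i : Int)) (some j)   -- IndexError point, outside Pre_

def pothole_to_camel_alt (pothole : String) : String :=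
  String.ofList (pvBLoop pothole.toList (pothole.toList.length + 1) 0 [])

-- ===== PRECONDITION & SPEC =====
-- Pre_ excludes exactly the inputs on which Python A raises IndexError: a maximal trailing run of
-- underscores of odd length (e.g. "a_", "___"); Python B raises there too.
def Pre_pothole_to_camel (pothole : String) : Prop :=
  (pothole.toList.reverse.takeWhile (· == '_')).length % 2 = 0
instance (pothole : String) : Decidable (Pre_pothole_to_camel pothole) := by
  unfold Pre_pothole_to_camel; infer_instance

def pvWitness_pothole_to_camel : String := "to_camel_case"

def Spec_pothole_to_camel (pothole : String) (out : String) : Prop := out = pothole_to_camel_alt pothole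
instance (pothole : String) (out : String) : Decidable (Spec_pothole_to_camel pothole out) := by unfold Spec_pothole_to_camel; infer_instance

-- ===== CLAIM (what is proved, stated in full; the proofs are below) =====
def Claim_equal_pothole_to_camel : Prop := ∀ (pothole : String), Dom_pothole_to_camel pothole → Pre_pothole_to_camel pothole → Spec_pothole_to_camel pothole (pothole_to_camel pothole)

-- ===== LEMMAS AND PROOFS =====

-- ['x'] is a prefix of l iff l starts with 'x'
theorem pv_singleton_prefix {c : Char} {l : List Char} : [c] <+: l ↔ ∃ t, l = c :: t := by
  constructor
  · rintro ⟨t, rfl⟩; exact ⟨t, rfl⟩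
  · rintro ⟨t, rfl⟩; exact ⟨t, rfl⟩

-- find is characterised by "first index where sub is a prefix of the drop"
theorem pv_find_eq_of (s sub : List Char) (m : Nat)
    (h1 : sub <+: s.drop m) (h2 : ∀ j < m, ¬ sub <+: s.drop j) :
    PySem.Chars.find s sub = m := by
  have hinf : sub <:+: s := h1.isInfix.trans (List.drop_suffix m s).isInfix
  have hnn : 0 ≤ PySem.Chars.find s sub := (PySem.Chars.find_nonneg_iff s sub).mpr hinf
  obtain ⟨hpre, hmin⟩ := PySem.Chars.find_spec (s := s) (sub := sub) hnn
  have h3 : ¬ (PySem.Chars.find s sub).toNat < m := fun h => h2 _ h hpre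
  have h4 : ¬ m < (PySem.Chars.find s sub).toNat := fun h => hmin m h h1
  omega

theorem pv_find_eq_neg_one_of (s sub : List Char) (h : ∀ j, ¬ sub <+: s.drop j) :
    PySem.Chars.find s sub = -1 := by
  apply (PySem.Chars.find_eq_neg_one_iff s sub).mpr
  rintro ⟨t, u, hl⟩
  apply h t.length
  rw [← hl, List.append_assoc, List.drop_left]
  exact ⟨u, rfl⟩

-- F1: no underscore at or after i
theorem pv_findFrom_none (cs : List Char) (i : Nat) (hi : i ≤ cs.length)
    (h : '_' ∉ cs.drop i) : PySem.Chars.findFrom cs ['_'] (i : Int) none = -1 := by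
  rw [PySem.Chars.findFrom_natCast cs ['_'] i hi]
  have : PySem.Chars.find (cs.drop i) ['_'] = -1 := by
    apply pv_find_eq_neg_one_of
    intro j hj
    obtain ⟨t, ht⟩ := pv_singleton_prefix.mp hj
    exact h (List.mem_of_mem_drop (by rw [ht]; exact List.mem_cons_self))
  simp [this]

-- F2: underscore right at i
theorem pv_findFrom_self (cs : List Char) (i : Nat) (hi : i < cs.length)
    (h : cs[i] = '_') : PySem.Chars.findFrom cs ['_'] (i : Int) none = (i : Int) := by
  rw [PySem.Chars.findFrom_natCast cs ['_'] i (le_of_lt hi)]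
  have hdrop : cs.drop i = '_' :: cs.drop (i + 1) := by
    rw [List.drop_eq_getElem_cons hi, h]
  have : PySem.Chars.find (cs.drop i) ['_'] = (0 : Nat) := by
    apply pv_find_eq_of
    · simp [hdrop]
    · omega
  simp [this]

-- drop-index arithmetic helper
theorem pv_drop_add (cs : List Char) (a b : Nat) : (cs.drop a).drop b = cs.drop (a + b) := by
  rw [List.drop_drop]

-- F3: skipping a non-underscore character
theorem pv_findFrom_step (cs : List Char) (i : Nat) (hi : i < cs.length)
    (h : cs[i] ≠ '_') :
    PySem.Chars.findFrom cs ['_'] (i : Int) none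
      = PySem.Chars.findFrom cs ['_'] ((i + 1 : Nat) : Int) none := by
  have hdrop : cs.drop i = cs[i] :: cs.drop (i + 1) := List.drop_eq_getElem_cons hi
  rw [PySem.Chars.findFrom_natCast cs ['_'] i (le_of_lt hi),
      PySem.Chars.findFrom_natCast cs ['_'] (i + 1) (by omega)]
  by_cases hn : PySem.Chars.find (cs.drop (i + 1)) ['_'] = -1
  · have : PySem.Chars.find (cs.drop i) ['_'] = -1 := by
      apply pv_find_eq_neg_one_of
      intro j hj
      rcases Nat.eq_zero_or_pos j with rfl | hj0
      · rw [List.drop_zero, hdrop] at hj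
        obtain ⟨t, ht⟩ := pv_singleton_prefix.mp hj
        exact h (List.cons_eq_cons.mp ht).1
      · obtain ⟨j', rfl⟩ := Nat.exists_eq_add_of_lt hj0
        rw [show 0 + j' + 1 = j' + 1 from by omega, hdrop, List.drop_succ_cons,
            pv_drop_add, ← pv_drop_add] at hj
        exact ((PySem.Chars.find_eq_neg_one_iff _ _).mp hn)
          (hj.isInfix.trans (List.drop_suffix j' (cs.drop (i + 1))).isInfix)
    simp [this, hn]
  · have hnn : 0 ≤ PySem.Chars.find (cs.drop (i + 1)) ['_'] := by
      have := PySem.Chars.neg_one_le_find (s := cs.drop (i + 1)) (sub := ['_'])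
      omega
    obtain ⟨hpre, hmin⟩ := PySem.Chars.find_spec (s := cs.drop (i + 1)) (sub := ['_']) hnn
    set k := (PySem.Chars.find (cs.drop (i + 1)) ['_']).toNat with hk
    have hfind : PySem.Chars.find (cs.drop i) ['_'] = ((k + 1 : Nat) : Int) := by
      apply pv_find_eq_of
      · rw [hdrop, List.drop_succ_cons]
        exact hpre
      · intro j hj hp
        rcases Nat.eq_zero_or_pos j with rfl | hj0
        · rw [List.drop_zero, hdrop] at hp
          obtain ⟨t, ht⟩ := pv_singleton_prefix.mp hp
          exact h (List.cons_eq_cons.mp ht).1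
        · obtain ⟨j', rfl⟩ := Nat.exists_eq_add_of_lt hj0
          rw [show 0 + j' + 1 = j' + 1 from by omega, hdrop, List.drop_succ_cons] at hp
          exact hmin j' (by omega) hp
    have hki : PySem.Chars.find (cs.drop (i + 1)) ['_'] = (k : Int) := by omega
    rw [hfind, hki]
    simp
    omega

-- facts about a successful find: nonnegative, at or after i, inside the string, at an underscore
theorem pv_findFrom_spec (cs : List Char) (i : Nat) (hi : i ≤ cs.length)
    (hne : PySem.Chars.findFrom cs ['_'] (i : Int) none ≠ -1) :
    0 ≤ PySem.Chars.findFrom cs ['_'] (i : Int) none ∧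
    i ≤ (PySem.Chars.findFrom cs ['_'] (i : Int) none).toNat ∧
    (PySem.Chars.findFrom cs ['_'] (i : Int) none).toNat < cs.length := by
  obtain ⟨h1, h2, _⟩ := PySem.Chars.findFrom_natCast_spec cs ['_'] i hi hne
  obtain ⟨t, ht⟩ := pv_singleton_prefix.mp h2
  have hlen : (PySem.Chars.findFrom cs ['_'] (i : Int) none).toNat < cs.length := by
    by_contra hge
    rw [List.drop_eq_nil_of_le (by omega)] at ht
    exact absurd ht (by simp)
  exact ⟨by omega, by omega, hlen⟩

-- slice facts (stated on PySem.List.slice, the normal form after simp)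
theorem pv_slice_from (cs : List Char) (i : Nat) :
    PySem.List.slice cs (some (i : Int)) none = cs.drop i := by
  simp [PySem.List.slice_from_natCast]

theorem pv_slice_nil (cs : List Char) (i : Nat) :
    PySem.List.slice cs (some (i : Int)) (some (i : Int)) = [] := by
  simp [PySem.List.slice_natCast]

theorem pv_slice_cons (cs : List Char) (i j : Nat) (hij : i < j) (hi : i < cs.length) :
    PySem.List.slice cs (some (i : Int)) (some (j : Int))
      = cs[i] :: PySem.List.slice cs (some ((i + 1 : Nat) : Int)) (some (j : Int)) := by
  simp only [PySem.List.slice_natCast]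
  rw [List.drop_eq_getElem_cons hi]
  rw [show j - i = (j - (i + 1)) + 1 from by omega, List.take_succ_cons]

-- main lemma: the two loops agree (given enough fuel for B); strong induction on the remaining length
theorem pv_loops_eq (cs : List Char) : ∀ n i word fuel, cs.length - i = n → i ≤ cs.length →
    cs.length - i < fuel → pvALoop cs i word = pvBLoop cs fuel i word := by
  intro n
  induction n using Nat.strong_induction_on with
  | _ n ihn =>
    intro i word fuel hn hi hfuel
    obtain ⟨f, rfl⟩ : ∃ f, fuel = f + 1 := ⟨fuel - 1, by omega⟩
    by_cases hlt : i < cs.length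
    · by_cases hu : cs[i] = '_'
      · -- underscore at i: B's find returns i, both consume the pair
        have hj := pv_findFrom_self cs i hlt hu
        rw [pvALoop]
        simp only [hlt, ↓reduceDIte, hu, ne_eq, not_true_eq_false, ↓reduceIte]
        rw [pvBLoop]
        simp only [hj]
        have hjne : (i : Int) ≠ -1 := by omega
        simp only [hjne, ↓reduceIte, Int.toNat_natCast]
        cases hd : cs[i + 1]? with
        | none => simp [pv_slice_nil]
        | some d =>
          have hi1 : i + 1 < cs.length := (List.getElem?_eq_some_iff.mp hd).1
          simp only [PySem.Chars.slice_eq_listSlice, pv_slice_nil, List.append_nil]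
          exact ihn (cs.length - (i + 2)) (by omega) (i + 2) (word ++ PySem.Chars.upper [d]) f
            rfl (by omega) (by omega)
      · -- ordinary character at i: A consumes it; B's body at i equals B's body at i+1 with it appended
        have hstep := pv_findFrom_step cs i hlt hu
        have key : pvBLoop cs (f + 1) i word = pvBLoop cs (f + 1) (i + 1) (word ++ [cs[i]]) := by
          rw [pvBLoop]
          conv_rhs => rw [pvBLoop]
          simp only [hstep]
          by_cases hnone : PySem.Chars.findFrom cs ['_'] ((i + 1 : Nat) : Int) none = -1
          · simp only [hnone, ↓reduceIte, PySem.Chars.slice_eq_listSlice, pv_slice_from]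
            rw [List.drop_eq_getElem_cons hlt]
            simp
          · obtain ⟨hpos, hij, hjlen⟩ := pv_findFrom_spec cs (i + 1) (by omega) hnone
            set j := (PySem.Chars.findFrom cs ['_'] ((i + 1 : Nat) : Int) none).toNat with hjdef
            have hjcast : PySem.Chars.findFrom cs ['_'] ((i + 1 : Nat) : Int) none = (j : Int) := by
              omega
            have hslice : PySem.List.slice cs (some (i : Int)) (some ((j : Nat) : Int))
                = cs[i] :: PySem.List.slice cs (some ((i + 1 : Nat) : Int)) (some ((j : Nat) : Int)) :=
              pv_slice_cons cs i j (by omega) hlt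
            simp only [hjcast, PySem.Chars.slice_eq_listSlice, hslice]
            cases cs[j + 1]? with
            | none => simp
            | some d => simp
        rw [pvALoop]
        simp only [hlt, ↓reduceDIte, hu, ne_eq, not_false_eq_true, ↓reduceIte]
        rw [key]
        exact ihn (cs.length - (i + 1)) (by omega) (i + 1) (word ++ [cs[i]]) (f + 1)
          rfl (by omega) (by omega)
    · -- i = len: A stops; B finds nothing and appends the empty tail
      have hieq : i = cs.length := by omega
      rw [pvALoop, pvBLoop]
      simp only [hlt, ↓reduceDIte]
      rw [pv_findFrom_none cs i hi (by rw [hieq]; simp)]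
      simp [List.drop_eq_nil_of_le (le_of_eq hieq.symm)]

-- ===== VERDICT (by name: the statement is the Claim_ definition above) =====
theorem pothole_to_camel_spec : Claim_equal_pothole_to_camel := by
  intro pothole _ _
  unfold Spec_pothole_to_camel pothole_to_camel pothole_to_camel_alt
  rw [pv_loops_eq pothole.toList (pothole.toList.length) 0 [] (pothole.toList.length + 1) rfl (by omega) (by omega)]
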